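-- pv_equiv track=rewrite | github.com/GZMaster/LeetCodes | src/pyscripts/longestPalindromicSubstring.py | combinationArray
-- ===== SOURCE A (Python) =====
-- def combinationArray(s: str) -> list:
--     new_list = []
--
--     for i in range(len(s)):
--         for j in range(i+1, len(s) + 1):
--             if len(set(s[i:j])) == len(s[i:j]):
--                 new_list.append(s[i:j])
--             else:
--                 break
--
--     return new_list
-- ===== SOURCE B (Python) =====
-- def combinationArray(s: str) -> list:
--     # Two-phase DP: reach[i] = length of the longest distinct-character run
--     # starting at i, computed right-to-left via reach[i] = min(reach[i+1] + 1,
--     # next_occurrence_of_s[i] - i); then emit the substrings directly.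
--     n = len(s)
--     nxt = {}
--     rev = []
--     r = 0
--     for i in range(n - 1, -1, -1):
--         r = min(r + 1, nxt.get(s[i], n) - i)
--         rev.append(r)
--         nxt[s[i]] = i
--     rev.reverse()
--     return [s[i:i + k] for i in range(n) for k in range(1, rev[i] + 1)]
-- ===== Notes on version B (the rewrite author's own statement) =====
-- stated objective: faster
-- what changed: B replaces A's per-start extension loop that re-slices s[i:j] and rebuilds a set of the whole slice at every step by a two-phase DP: a single right-to-left pass computes reach[i] = min(reach[i+1]+1, next_occurrence(s[i]) - i) using a last-seen dictionary, then the substrings are emitted directly from the reach table.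
import Mathlib
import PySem

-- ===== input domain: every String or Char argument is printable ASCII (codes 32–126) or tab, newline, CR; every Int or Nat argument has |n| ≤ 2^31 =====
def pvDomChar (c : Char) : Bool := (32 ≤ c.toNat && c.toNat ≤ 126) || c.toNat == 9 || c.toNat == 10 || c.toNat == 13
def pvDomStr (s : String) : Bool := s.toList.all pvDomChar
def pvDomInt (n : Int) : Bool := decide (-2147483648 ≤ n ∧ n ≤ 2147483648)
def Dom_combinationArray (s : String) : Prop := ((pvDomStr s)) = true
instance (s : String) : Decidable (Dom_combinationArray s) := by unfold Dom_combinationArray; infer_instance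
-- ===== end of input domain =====

-- B replaces A's per-start extension loop (re-slicing and rebuilding a set each step) by a
-- two-phase DP: a right-to-left pass computes reach[i] = length of the longest
-- distinct-character run starting at i via reach[i] = min(reach[i+1]+1, next_occ(s[i]) - i),
-- then the substrings are emitted directly; return value proved identical.

-- ===== PORT A =====
-- inner loop: for j in range(i+1, n+1): if len(set(s[i:j])) == len(s[i:j]): append s[i:j] else break
def combArrayAInner (l : List Char) (i j n : Nat) (acc : List String) : List String :=
  if _h : j ≤ n then
    let sub := PySem.List.slice l (some (i : Int)) (some (j : Int))
    if (PySem.Set.ofList sub).length = sub.length then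
      combArrayAInner l i (j + 1) n (acc ++ [String.ofList sub])
    else acc
  else acc
termination_by n + 1 - j

-- outer loop: for i in range(len(s))
def combArrayAOuter (l : List Char) (i n : Nat) (acc : List String) : List String :=
  if _h : i < n then
    combArrayAOuter l (i + 1) n (combArrayAInner l i (i + 1) n acc)
  else acc
termination_by n - i

def combinationArray (s : String) : List String :=
  combArrayAOuter s.toList 0 s.toList.length []

-- ===== PORT B =====
-- DP loop: for i in range(n-1, -1, -1): r = min(r+1, nxt.get(s[i], n) - i); rev.append(r); nxt[s[i]] = i
def combArrayBLoop (l : List Char) (i : Nat) (r : Int) (rev : List Int)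
    (nxt : PySem.Dict Char Int) : List Int :=
  match i with
  | 0 => rev
  | i' + 1 =>
      let c := PySem.List.pyGetD l (i' : Int) ' '
      let r' := min (r + 1) (nxt.getD c (l.length : Int) - i')
      combArrayBLoop l i' r' (rev ++ [r']) (nxt.insert c i')

-- rev.reverse(); return [s[i:i+k] for i in range(n) for k in range(1, rev[i]+1)]
def combinationArray_alt (s : String) : List String :=
  let l := s.toList
  let n := l.length
  let rev := (combArrayBLoop l n 0 [] PySem.Dict.empty).reverse
  (PySem.List.pyRange 0 (n : Int) 1).flatMap (fun i =>
    (PySem.List.pyRange 1 (PySem.List.pyGetD rev i 0 + 1) 1).map (fun k =>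
      String.ofList (PySem.List.slice l (some i) (some (i + k)))))

-- ===== PRECONDITION & SPEC =====
def Spec_combinationArray (s : String) (out : List String) : Prop := out = combinationArray_alt s
instance (s : String) (out : List String) : Decidable (Spec_combinationArray s out) := by unfold Spec_combinationArray; infer_instance

-- ===== CLAIM (what is proved, stated in full; the proofs are below) =====
def Claim_equal_combinationArray : Prop := ∀ (s : String), Dom_combinationArray s → Spec_combinationArray s (combinationArray s)

-- ===== LEMMAS AND PROOFS =====

-- length of the longest distinct-character prefix of t
def Lp : List Char → Nat
  | [] => 0
  | c :: t => min (Lp t + 1) ((if c ∈ t then t.idxOf c else t.length) + 1)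

theorem Lp_le_length (t : List Char) : Lp t ≤ t.length := by
  induction t with
  | nil => simp [Lp]
  | cons c t ih => simp only [Lp, List.length_cons]; omega

-- len(set(xs)) == len(xs) is exactly Nodup
theorem set_ofList_length_eq_iff (xs : List Char) :
    (PySem.Set.ofList xs).length = xs.length ↔ xs.Nodup := by
  have hperm : (PySem.Set.ofList xs).Perm xs.dedup := by
    rw [List.perm_ext_iff_of_nodup (PySem.Set.nodup_ofList xs) (List.nodup_dedup xs)]
    intro a; simp [PySem.Set.mem_ofList xs a]
  rw [hperm.length_eq]
  constructor
  · intro h; exact List.dedup_eq_self.mp ((List.dedup_sublist xs).eq_of_length h)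
  · intro h; rw [List.dedup_eq_self.mpr h]

-- a prefix of t has no duplicate exactly up to length Lp t
theorem take_nodup_iff (t : List Char) (k : Nat) :
    (t.take k).Nodup ↔ min k t.length ≤ Lp t := by
  induction t generalizing k with
  | nil => simp [Lp]
  | cons c t ih =>
    cases k with
    | zero => simp
    | succ k =>
      simp only [List.take_succ_cons, List.nodup_cons, ih, Lp, List.length_cons]
      have hE : c ∉ t.take k ↔ min k t.length ≤ (if c ∈ t then t.idxOf c else t.length) := by
        by_cases hc : c ∈ t
        · rw [if_pos hc]
          have hlt := List.idxOf_lt_length_of_mem hc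
          rw [← not_iff_not, not_not, List.mem_take_iff_idxOf_lt hc]
          omega
        · rw [if_neg hc]
          constructor
          · intro _; omega
          · intro _ hmem; exact hc (List.mem_of_mem_take hmem)
      rw [hE]
      omega

-- A's inner loop, re-expressed on the tail t = l.drop i with prefix length k = j - i
def combArrayATail (t : List Char) (k : Nat) (acc : List String) : List String :=
  if _h : k ≤ t.length then
    let sub := t.take k
    if (PySem.Set.ofList sub).length = sub.length then
      combArrayATail t (k + 1) (acc ++ [String.ofList sub])
    else acc
  else acc
termination_by t.length + 1 - k

theorem aInner_eq_tail_aux (fuel : Nat) : ∀ (l : List Char) (i j : Nat) (acc : List String),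
    i ≤ j → i ≤ l.length → l.length + 1 - j ≤ fuel →
    combArrayAInner l i j l.length acc = combArrayATail (l.drop i) (j - i) acc := by
  induction fuel with
  | zero =>
    intro l i j acc hij hil hf
    rw [combArrayAInner, combArrayATail, dif_neg (by omega), dif_neg (by simp; omega)]
  | succ f ih =>
    intro l i j acc hij hil hf
    by_cases hj : j ≤ l.length
    · rw [combArrayAInner, combArrayATail, dif_pos hj, dif_pos (by simp; omega)]
      simp only [PySem.List.slice_natCast l i j]
      split
      · rw [ih l i (j+1) _ (by omega) hil (by omega)]
        congr 1
        omega
      · rfl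
    · rw [combArrayAInner, combArrayATail, dif_neg hj, dif_neg (by simp; omega)]

theorem aInner_eq_tail (l : List Char) (i j : Nat) (hij : i ≤ j) (hin : i ≤ l.length)
    (acc : List String) :
    combArrayAInner l i j l.length acc = combArrayATail (l.drop i) (j - i) acc :=
  aInner_eq_tail_aux (l.length + 1 - j) l i j acc hij hin le_rfl

-- the tail loop emits exactly the prefixes of lengths k … Lp t
theorem tail_emits_aux (fuel : Nat) : ∀ (t : List Char) (k : Nat) (acc : List String),
    1 ≤ k → (t.take (k - 1)).Nodup → t.length + 1 - k ≤ fuel →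
    combArrayATail t k acc
      = acc ++ (List.range' k (Lp t + 1 - k)).map (fun j => String.ofList (t.take j)) := by
  induction fuel with
  | zero =>
    intro t k acc hk _ hf
    have hLp := Lp_le_length t
    rw [combArrayATail, dif_neg (by omega)]
    have : Lp t + 1 - k = 0 := by omega
    simp [this]
  | succ f ih =>
    intro t k acc hk hnd hf
    have hLp := Lp_le_length t
    by_cases hkl : k ≤ t.length
    · rw [combArrayATail, dif_pos hkl]
      simp only [set_ofList_length_eq_iff]
      by_cases hndk : (t.take k).Nodup
      · rw [if_pos hndk]
        have hkLp : k ≤ Lp t := by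
          have := (take_nodup_iff t k).mp hndk; omega
        rw [ih t (k+1) _ (by omega) (by simpa using hndk) (by omega)]
        have hrange : Lp t + 1 - k = (Lp t + 1 - (k+1)) + 1 := by omega
        rw [hrange, List.range'_succ]
        simp
      · rw [if_neg hndk]
        have : ¬ (min k t.length ≤ Lp t) := fun h => hndk ((take_nodup_iff t k).mpr h)
        have h0 : Lp t + 1 - k = 0 := by omega
        simp [h0]
    · rw [combArrayATail, dif_neg hkl]
      have h0 : Lp t + 1 - k = 0 := by omega
      simp [h0]

-- A's whole computation as a flatten of per-start prefix lists
theorem aOuter_flatten_aux (fuel : Nat) : ∀ (l : List Char) (i : Nat) (acc : List String),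
    l.length - i ≤ fuel →
    combArrayAOuter l i l.length acc
      = acc ++ (List.range' i (l.length - i)).flatMap (fun j =>
          (List.range' 1 (Lp (l.drop j))).map (fun m => String.ofList ((l.drop j).take m))) := by
  induction fuel with
  | zero =>
    intro l i acc hf
    rw [combArrayAOuter, dif_neg (by omega)]
    have : l.length - i = 0 := by omega
    simp [this]
  | succ f ih =>
    intro l i acc hf
    by_cases hi : i < l.length
    · rw [combArrayAOuter, dif_pos hi]
      have h1 : combArrayAInner l i (i + 1) l.length acc = combArrayATail (l.drop i) 1 acc := by
        have := aInner_eq_tail l i (i + 1) (by omega) (by omega) acc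
        simpa using this
      rw [h1, tail_emits_aux (l.length) (l.drop i) 1 acc le_rfl (by simp) (by simp),
          ih l (i+1) _ (by omega)]
      have hsplit : l.length - i = (l.length - (i+1)) + 1 := by omega
      rw [hsplit, List.range'_succ]
      simp
    · rw [combArrayAOuter, dif_neg hi]
      have : l.length - i = 0 := by omega
      simp [this]

-- B's DP loop computes Lp of every suffix
theorem bLoop_spec (l : List Char) : ∀ (i : Nat) (r : Int) (rev : List Int)
    (nxt : PySem.Dict Char Int), i ≤ l.length →
    r = (Lp (l.drop i) : Int) →
    (∀ c, nxt.getD c (l.length : Int)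
        = if c ∈ l.drop i then (i : Int) + ((l.drop i).idxOf c : Int) else (l.length : Int)) →
    combArrayBLoop l i r rev nxt
      = rev ++ ((List.range i).reverse.map (fun j => (Lp (l.drop j) : Int))) := by
  intro i
  induction i with
  | zero => intro r rev nxt _ _ _; simp [combArrayBLoop]
  | succ i' ih =>
    intro r rev nxt hi hr hnxt
    have hi' : i' < l.length := by omega
    have hc : PySem.List.pyGetD l (i' : Int) ' ' = l[i'] := by
      simp [PySem.List.pyGetD_natCast, List.getD_eq_getElem?_getD, List.getElem?_eq_getElem hi']
    have hdrop : l.drop i' = l[i'] :: l.drop (i' + 1) := List.drop_eq_getElem_cons hi'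
    rw [combArrayBLoop]
    simp only [hc]
    set c := l[i'] with hcdef
    set t := l.drop (i' + 1) with htdef
    have htlen : t.length = l.length - (i' + 1) := by simp [htdef]
    -- the computed value is Lp (l.drop i')
    have hr' : min (r + 1) (nxt.getD c (l.length : Int) - (i' : Int))
        = ((Lp (l.drop i') : Nat) : Int) := by
      rw [hnxt c, hr, hdrop]
      simp only [Lp]
      by_cases hct : c ∈ t
      · rw [if_pos hct, if_pos hct]
        have := List.idxOf_lt_length_of_mem hct
        push_cast
        omega
      · rw [if_neg hct, if_neg hct]
        have := Lp_le_length t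
        push_cast
        omega
    rw [hr']
    rw [ih ((Lp (l.drop i') : Nat) : Int) (rev ++ [((Lp (l.drop i') : Nat) : Int)]) _ (by omega) rfl ?_]
    · rw [List.range_succ]
      simp
    · intro c'
      rw [PySem.Dict.getD_insert, hdrop]
      by_cases hcc : c' = c
      · subst hcc
        rw [if_pos rfl, if_pos List.mem_cons_self]
        simp [List.idxOf_cons_self]
      · rw [if_neg hcc, hnxt c']
        have hmem : c' ∈ c :: t ↔ c' ∈ t := by simp [hcc]
        by_cases hct : c' ∈ t
        · rw [if_pos hct, if_pos (hmem.mpr hct), List.idxOf_cons_ne _ (by simpa using (Ne.symm hcc))]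
          push_cast
          ring
        · rw [if_neg hct, if_neg (fun h => hct (hmem.mp h))]

-- the reach table after reversing: index j ↦ Lp (l.drop j)
theorem rev_spec (l : List Char) :
    (combArrayBLoop l l.length 0 [] PySem.Dict.empty).reverse
      = (List.range l.length).map (fun j => (Lp (l.drop j) : Int)) := by
  rw [bLoop_spec l l.length 0 [] PySem.Dict.empty le_rfl (by simp [Lp]) ?_]
  · simp
  · intro c; simp [PySem.Dict.getD_empty]

-- B's generation phase produces the same flatten
theorem b_flatten (s : String) :
    combinationArray_alt s
      = (List.range' 0 (s.toList.length)).flatMap (fun j =>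
          (List.range' 1 (Lp (s.toList.drop j))).map
            (fun m => String.ofList ((s.toList.drop j).take m))) := by
  unfold combinationArray_alt
  simp only [rev_spec]
  rw [PySem.List.pyRange_zero (s.toList.length : Int)]
  simp only [Int.toNat_natCast, List.flatMap_map, List.range'_eq_map_range, Nat.zero_add]
  apply List.flatMap_congr
  intro j hj
  have hjn : j < s.toList.length := List.mem_range.mp hj
  rw [PySem.List.pyGetD_natCast, PySem.List.getD_map_range _ _ _ _ hjn]
  rw [PySem.List.pyRange_one 1 ((Lp (s.toList.drop j) : Int) + 1)]
  have : ((Lp (s.toList.drop j) : Int) + 1 - 1).toNat = Lp (s.toList.drop j) := by omega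
  rw [this]
  simp only [List.map_map]
  apply List.map_congr_left
  intro k _
  simp only [Function.comp]
  have hcast : (j : Int) + ((1 : Int) + (k : Nat)) = (j : Int) + (((1 + k : Nat) : Int)) := by
    push_cast; ring
  rw [hcast, PySem.List.slice_natCast_add]

-- ===== VERDICT (by name: the statement is the Claim_ definition above) =====
theorem combinationArray_spec : Claim_equal_combinationArray := by
  intro s _
  unfold Spec_combinationArray combinationArray
  rw [aOuter_flatten_aux (s.toList.length) s.toList 0 [] le_rfl, b_flatten]
  simp
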